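-- pv_equiv track=rewrite | github.com/LovenSar/Windows_API_PDF_OCR_Graph | pipeline.py | _append_missing_closers
-- ===== SOURCE A (Python) =====
-- def _append_missing_closers(text: str) -> str:
--     """为截断 JSON 自动补齐缺失的 ]/}，忽略字符串内部符号。"""
--     stack = []
--     in_str = False
--     esc = False
--     for ch in text:
--         if in_str:
--             if esc:
--                 esc = False
--             elif ch == '\\':
--                 esc = True
--             elif ch == '"':
--                 in_str = False
--             continue
--         if ch == '"':
--             in_str = True
--         elif ch in '{[':
--             stack.append('}' if ch == '{' else ']')
--         elif ch in '}]':
--             if stack and ch == stack[-1]: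
--                 stack.pop()
--     if not stack:
--         return text
--     return text + ''.join(reversed(stack))
-- ===== SOURCE B (Python) =====
-- def _append_missing_closers(text: str) -> str:
--     """Append missing ]/} to truncated JSON; index-based scan that skips string literals in an inner loop."""
--     closers = {'{': '}', '[': ']'}
--     stack = []
--     i, n = 0, len(text)
--     while i < n:
--         ch = text[i]
--         if ch == '"':
--             i += 1
--             while i < n:
--                 c = text[i]
--                 if c == '\\':
--                     i += 2
--                 elif c == '"':
--                     i += 1
--                     break
--                 else:
--                     i += 1
--             continue
--         if ch in closers:
--             stack.append(closers[ch])
--         elif stack and ch == stack[-1]: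
--             stack.pop()
--         i += 1
--     if not stack:
--         return text
--     return text + ''.join(reversed(stack))
-- ===== Notes on version B (the rewrite author's own statement) =====
-- stated objective: alternative
-- what changed: Replaced A's single pass with per-character in_str/esc boolean flags by an index-based outer scan whose dedicated inner loop skips each whole JSON string literal (consuming escape pairs two characters at a time), with the bracket stack handled by a closers dict and a direct top-of-stack comparison.
import Mathlib
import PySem

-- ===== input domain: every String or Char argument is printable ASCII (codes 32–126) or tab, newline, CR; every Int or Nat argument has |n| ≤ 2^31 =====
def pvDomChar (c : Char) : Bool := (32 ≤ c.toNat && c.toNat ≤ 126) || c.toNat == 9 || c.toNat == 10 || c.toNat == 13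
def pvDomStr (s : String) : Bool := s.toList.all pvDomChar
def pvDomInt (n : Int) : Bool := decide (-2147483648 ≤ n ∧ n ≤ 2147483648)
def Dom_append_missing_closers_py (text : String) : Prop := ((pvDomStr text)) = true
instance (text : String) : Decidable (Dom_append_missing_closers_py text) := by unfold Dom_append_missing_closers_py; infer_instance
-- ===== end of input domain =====

-- B replaces A's per-character in_str/esc flag machine by an index-style scan whose inner loop
-- skips each whole string literal; objective: alternative decomposition (same cost).
-- Stacks are represented head-as-top, so Python's ''.join(reversed(stack)) is String.ofList stack.

-- ===== PORT A =====
-- one step of A's for-loop body on state (stack, in_str, esc)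
def aStep (st : List Char × Bool × Bool) (ch : Char) : List Char × Bool × Bool :=
  match st with
  | (stack, in_str, esc) =>
    if in_str then
      if esc then (stack, true, false)
      else if ch = '\\' then (stack, true, true)
      else if ch = '"' then (stack, false, false)
      else (stack, true, false)
    else
      if ch = '"' then (stack, true, false)
      else if ch = '{' ∨ ch = '[' then ((if ch = '{' then '}' else ']') :: stack, false, false)
      else if ch = '}' ∨ ch = ']' then
        match stack with
        | t :: s => if ch = t then (s, false, false) else (stack, false, false)
        | [] => (stack, false, false)
      else (stack, false, false)

def append_missing_closers_py (text : String) : String :=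
  let st := text.toList.foldl aStep ([], false, false)
  if st.1 = [] then text else text ++ String.ofList st.1

-- ===== PORT B =====
-- inner while loop: skip past the string literal starting just after an opening quote
def bSkip : List Char → List Char
  | [] => []
  | c :: rest =>
    if c = '\\' then
      match rest with
      | [] => []
      | _ :: r => bSkip r
    else if c = '"' then rest
    else bSkip rest

theorem bSkip_nil : bSkip [] = [] := by rw [bSkip.eq_def]
theorem bSkip_q (rest : List Char) : bSkip ('"' :: rest) = rest := by rw [bSkip.eq_def]; simp
theorem bSkip_bs_nil : bSkip ['\\'] = [] := by rw [bSkip.eq_def]; simp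
theorem bSkip_bs (d : Char) (r : List Char) : bSkip ('\\' :: d :: r) = bSkip r := by rw [bSkip.eq_def]; simp
theorem bSkip_other (rest : List Char) {c : Char} (hb : ¬ c = '\\') (hq : ¬ c = '"') :
    bSkip (c :: rest) = bSkip rest := by rw [bSkip.eq_def]; simp [hb, hq]

theorem bSkip_length_le : ∀ l : List Char, (bSkip l).length ≤ l.length := by
  intro l
  induction l using bSkip.induct with
  | case1 => simp [bSkip_nil]
  | case2 => simp [bSkip_bs_nil]
  | case3 d r ih => rw [bSkip_bs]; simp only [List.length_cons]; omega
  | case4 r => rw [bSkip_q]; simp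
  | case5 c r hb hq ih => rw [bSkip_other r hb hq]; simp only [List.length_cons]; omega

-- outer while loop over the remaining characters, stack head = top
def bGo : List Char → List Char → List Char
  | [], stack => stack
  | ch :: rest, stack =>
    if ch = '"' then bGo (bSkip rest) stack
    else if ch = '{' then bGo rest ('}' :: stack)
    else if ch = '[' then bGo rest (']' :: stack)
    else
      match stack with
      | t :: s => if ch = t then bGo rest s else bGo rest stack
      | [] => bGo rest []
termination_by l _ => l.length
decreasing_by
  · exact Nat.lt_succ_of_le (bSkip_length_le rest)
  all_goals simp

def append_missing_closers_py_alt (text : String) : String :=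
  let stack := bGo text.toList []
  if stack = [] then text else text ++ String.ofList stack

-- ===== PRECONDITION & SPEC =====
def Spec_append_missing_closers_py (text : String) (out : String) : Prop := out = append_missing_closers_py_alt text
instance (text : String) (out : String) : Decidable (Spec_append_missing_closers_py text out) := by unfold Spec_append_missing_closers_py; infer_instance

-- ===== CLAIM (what is proved, stated in full; the proofs are below) =====
def Claim_equal_append_missing_closers_py : Prop := ∀ (text : String), Dom_append_missing_closers_py text → Spec_append_missing_closers_py text (append_missing_closers_py text)

-- ===== LEMMAS AND PROOFS =====

-- small-step characterisations of A's loop body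
theorem aStep_esc (st : List Char) (c : Char) : aStep (st, true, true) c = (st, true, false) := by
  simp [aStep]
theorem aStep_in_bs (st : List Char) : aStep (st, true, false) '\\' = (st, true, true) := by
  simp [aStep]
theorem aStep_in_q (st : List Char) : aStep (st, true, false) '"' = (st, false, false) := by
  simp [aStep]
theorem aStep_in_other (st : List Char) {c : Char} (hb : ¬ c = '\\') (hq : ¬ c = '"') :
    aStep (st, true, false) c = (st, true, false) := by
  simp [aStep, hb, hq]
theorem aStep_out_q (st : List Char) : aStep (st, false, false) '"' = (st, true, false) := by
  simp [aStep]

-- unfolding equations for bGo (well-founded recursion)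
theorem bGo_nil (stack : List Char) : bGo [] stack = stack := by rw [bGo.eq_def]
theorem bGo_q (rest stack : List Char) : bGo ('"' :: rest) stack = bGo (bSkip rest) stack := by
  rw [bGo.eq_def]; simp
theorem bGo_ob (rest stack : List Char) : bGo ('{' :: rest) stack = bGo rest ('}' :: stack) := by
  rw [bGo.eq_def]; simp
theorem bGo_os (rest stack : List Char) : bGo ('[' :: rest) stack = bGo rest (']' :: stack) := by
  rw [bGo.eq_def]; simp
theorem bGo_other_nil (rest : List Char) {c : Char} (hq : ¬ c = '"') (hob : ¬ c = '{') (hos : ¬ c = '[') :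
    bGo (c :: rest) [] = bGo rest [] := by
  rw [bGo.eq_def]; simp [hq, hob, hos]
theorem bGo_other_cons (rest s : List Char) {c t : Char} (hq : ¬ c = '"') (hob : ¬ c = '{') (hos : ¬ c = '[') :
    bGo (c :: rest) (t :: s) = if c = t then bGo rest s else bGo rest (t :: s) := by
  rw [bGo.eq_def]; simp [hq, hob, hos]

-- A's in-string scanning (esc = false) consumes exactly the characters bSkip drops
theorem foldl_aStep_in_str : ∀ (n : ℕ) (l stack : List Char), l.length ≤ n →
    (l.foldl aStep (stack, true, false)).1 = ((bSkip l).foldl aStep (stack, false, false)).1 := by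
  intro n
  induction n with
  | zero =>
    intro l stack h
    have : l = [] := List.length_eq_zero_iff.mp (Nat.le_zero.mp h)
    subst this; simp [bSkip_nil]
  | succ n ih =>
    intro l stack h
    match l with
    | [] => simp [bSkip_nil]
    | c :: rest =>
      simp only [List.length_cons] at h
      by_cases hb : c = '\\'
      · subst hb
        match rest with
        | [] => simp [bSkip_bs_nil, aStep_in_bs, List.foldl]
        | d :: r =>
          simp only [List.foldl, aStep_in_bs, aStep_esc]
          rw [bSkip_bs]
          exact ih r stack (by simp at h; omega)
      · by_cases hq : c = '"'
        · subst hq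
          rw [bSkip_q]
          simp only [List.foldl, aStep_in_q]
        · rw [bSkip_other rest hb hq]
          simp only [List.foldl, aStep_in_other stack hb hq]
          exact ih rest stack (by omega)

theorem foldl_aStep_eq_bGo : ∀ (n : ℕ) (l stack : List Char), l.length ≤ n →
    (∀ x ∈ stack, x = '}' ∨ x = ']') →
    (l.foldl aStep (stack, false, false)).1 = bGo l stack := by
  intro n
  induction n with
  | zero =>
    intro l stack h _
    have : l = [] := List.length_eq_zero_iff.mp (Nat.le_zero.mp h)
    subst this; simp [bGo_nil]
  | succ n ih =>
    intro l stack h hstk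
    match l with
    | [] => simp [bGo_nil]
    | c :: rest =>
      simp only [List.length_cons] at h
      by_cases hq : c = '"'
      · subst hq
        rw [bGo_q]
        simp only [List.foldl, aStep_out_q]
        rw [foldl_aStep_in_str rest.length rest stack le_rfl]
        exact ih (bSkip rest) stack (Nat.le_trans (bSkip_length_le rest) (by omega)) hstk
      · by_cases hob : c = '{'
        · subst hob
          rw [bGo_ob]
          simp only [List.foldl, show aStep (stack, false, false) '{' = ('}' :: stack, false, false) by simp [aStep]]
          exact ih rest _ (by omega) (by
            intro x hx
            rcases List.mem_cons.mp hx with h1 | h1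
            · exact Or.inl h1
            · exact hstk x h1)
        · by_cases hos : c = '['
          · subst hos
            rw [bGo_os]
            simp only [List.foldl, show aStep (stack, false, false) '[' = (']' :: stack, false, false) by simp [aStep]]
            exact ih rest _ (by omega) (by
              intro x hx
              rcases List.mem_cons.mp hx with h1 | h1
              · exact Or.inr h1
              · exact hstk x h1)
          · by_cases hc : c = '}' ∨ c = ']'
            · match stack with
              | [] =>
                have ha : aStep ([], false, false) c = ([], false, false) := by
                  rcases hc with h1 | h1 <;> subst h1 <;> simp [aStep]
                rw [bGo_other_nil rest hq hob hos]
                simp only [List.foldl, ha]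
                exact ih rest [] (by omega) (by simp)
              | t :: s =>
                rw [bGo_other_cons rest s hq hob hos]
                by_cases hct : c = t
                · have ha : aStep (t :: s, false, false) c = (s, false, false) := by
                    subst hct; rcases hc with h1 | h1 <;> subst h1 <;> simp [aStep]
                  rw [if_pos hct]
                  simp only [List.foldl, ha]
                  exact ih rest s (by omega) (fun x hx => hstk x (List.mem_cons_of_mem t hx))
                · have ha : aStep (t :: s, false, false) c = (t :: s, false, false) := by
                    rcases hc with h1 | h1 <;> subst h1 <;> simp [aStep, hct]
                  rw [if_neg hct]
                  simp only [List.foldl, ha]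
                  exact ih rest (t :: s) (by omega) hstk
            · -- ordinary character: A leaves everything unchanged; B's pop cannot fire since the
              -- stack invariant makes every stack element a closer
              have ha : aStep (stack, false, false) c = (stack, false, false) := by
                simp [aStep, hq, hob, hos, hc]
              match stack with
              | [] =>
                rw [bGo_other_nil rest hq hob hos]
                simp only [List.foldl, ha]
                exact ih rest [] (by omega) (by simp)
              | t :: s =>
                have hct : ¬ c = t := by
                  intro hEq
                  exact hc (hEq ▸ hstk t List.mem_cons_self)
                rw [bGo_other_cons rest s hq hob hos, if_neg hct]
                simp only [List.foldl, ha]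
                exact ih rest (t :: s) (by omega) hstk

-- ===== VERDICT (by name: the statement is the Claim_ definition above) =====
theorem append_missing_closers_py_spec : Claim_equal_append_missing_closers_py := by
  intro text _
  unfold Spec_append_missing_closers_py append_missing_closers_py append_missing_closers_py_alt
  simp only [foldl_aStep_eq_bGo text.toList.length text.toList [] le_rfl (by simp)]
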